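-- pv_equiv track=rewrite | github.com/andrewswimmer111/catan-engine | src/domain/board/hex_geometry.py | axial_tiles
-- ===== SOURCE A (Python) =====
-- RADIUS = 2
--
-- def axial_tiles(radius: int = RADIUS) -> list[tuple[int, int]]:
--     """Return all axial (q, r) coordinates within the given hex radius."""
--     coords: list[tuple[int, int]] = []
--     for q in range(-radius, radius + 1):
--         r_min = max(-radius, -q - radius)
--         r_max = min(radius, -q + radius)
--         for r in range(r_min, r_max + 1):
--             coords.append((q, r))
--     return coords
-- ===== SOURCE B (Python) =====
-- RADIUS = 2
--
-- def axial_tiles(radius: int = RADIUS) -> list[tuple[int, int]]: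
--     """Return all axial (q, r) coordinates within the given hex radius."""
--     span = range(-radius, radius + 1)
--     return [(q, r) for q in span for r in span if abs(q + r) <= radius]
-- ===== Notes on version B (the rewrite author's own statement) =====
-- stated objective: idiomatic
-- what changed: B replaces the per-column precomputed r_min/r_max inner bounds with a single list comprehension scanning the full (2r+1)x(2r+1) bounding grid and keeping (q, r) iff abs(q+r) <= radius.
import Mathlib
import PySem

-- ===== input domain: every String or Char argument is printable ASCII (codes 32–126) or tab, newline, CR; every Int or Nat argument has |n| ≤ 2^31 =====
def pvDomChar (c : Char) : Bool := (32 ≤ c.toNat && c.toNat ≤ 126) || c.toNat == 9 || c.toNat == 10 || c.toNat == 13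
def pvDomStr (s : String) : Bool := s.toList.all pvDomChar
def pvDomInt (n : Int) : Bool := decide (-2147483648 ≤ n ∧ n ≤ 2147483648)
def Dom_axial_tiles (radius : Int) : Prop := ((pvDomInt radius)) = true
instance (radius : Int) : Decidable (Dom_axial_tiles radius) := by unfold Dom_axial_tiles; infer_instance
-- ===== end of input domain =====

-- B scans the full bounding grid with a membership test instead of A's precomputed inner bounds (idiomatic comprehension).

-- ===== PORT A =====
def axial_tiles (radius : Int) : List (Int × Int) :=
  (PySem.List.pyRange (-radius) (radius + 1) 1).foldl (fun coords q =>
    let r_min := max (-radius) (-q - radius)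
    let r_max := min radius (-q + radius)
    (PySem.List.pyRange r_min (r_max + 1) 1).foldl (fun cs r => cs ++ [(q, r)]) coords) []

-- ===== PORT B =====
def axial_tiles_alt (radius : Int) : List (Int × Int) :=
  let span := PySem.List.pyRange (-radius) (radius + 1) 1
  span.flatMap (fun q => span.flatMap (fun r => if |q + r| ≤ radius then [(q, r)] else []))

-- ===== PRECONDITION & SPEC =====
def Spec_axial_tiles (radius : Int) (out : List (Int × Int)) : Prop := out = axial_tiles_alt radius
instance (radius : Int) (out : List (Int × Int)) : Decidable (Spec_axial_tiles radius out) := by unfold Spec_axial_tiles; infer_instance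

-- ===== CLAIM (what is proved, stated in full; the proofs are below) =====
def Claim_equal_axial_tiles : Prop := ∀ (radius : Int), Dom_axial_tiles radius → Spec_axial_tiles radius (axial_tiles radius)

-- ===== LEMMAS AND PROOFS =====

-- a guarded flatMap is map-of-filter
theorem flatMap_if_eq_map_filter {α β : Type} (p : α → Prop) [DecidablePred p] (f : α → β) (l : List α) :
    l.flatMap (fun x => if p x then [f x] else []) = (l.filter (fun x => decide (p x))).map f := by
  induction l with
  | nil => rfl
  | cons a t ih => by_cases h : p a <;> simp [List.flatMap_cons, h, ih]

-- filtering a step-1 range by an interval condition is the clipped range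
theorem filter_pyRange_interval (lo hi : Int) : ∀ (a b : Int),
    (PySem.List.pyRange a b 1).filter (fun r => decide (lo ≤ r ∧ r ≤ hi)) =
      PySem.List.pyRange (max a lo) (min (b - 1) hi + 1) 1 := by
  intro a b
  by_cases hab : b ≤ a
  · rw [PySem.List.pyRange_one_eq_nil hab, PySem.List.pyRange_one_eq_nil (by omega)]
    rfl
  · rw [not_le] at hab
    obtain ⟨n, hn⟩ : ∃ n : Nat, b = a + n := ⟨(b - a).toNat, by omega⟩
    subst hn
    clear hab
    induction n generalizing a with
    | zero =>
      rw [show a + (0:Nat) = a by omega, PySem.List.pyRange_one_eq_nil le_rfl,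
        PySem.List.pyRange_one_eq_nil (by omega)]
      rfl
    | succ m ih =>
      rw [PySem.List.pyRange_one_cons (by omega), List.filter_cons]
      have ih' := ih (a + 1)
      rw [show a + 1 + (m:Int) = a + ((m+1:Nat):Int) by push_cast; ring] at ih'
      by_cases h1 : lo ≤ a
      · by_cases h2 : a ≤ hi
        · simp only [h1, h2, and_self, decide_true, if_true, ih']
          rw [show max a lo = a by omega, show max (a + 1) lo = a + 1 by omega,
            ← PySem.List.pyRange_one_cons (a := a)
              (b := min (a + ((m + 1 : Nat) : Int) - 1) hi + 1) (by omega)]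
        · simp only [decide_eq_true_eq, ih', if_neg (by omega : ¬ (lo ≤ a ∧ a ≤ hi))]
          rw [PySem.List.pyRange_one_eq_nil
                (a := max (a + 1) lo) (b := min (a + ((m + 1 : Nat) : Int) - 1) hi + 1) (by omega),
              PySem.List.pyRange_one_eq_nil
                (a := max a lo) (b := min (a + ((m + 1 : Nat) : Int) - 1) hi + 1) (by omega)]
      · simp only [decide_eq_true_eq, ih', if_neg (by omega : ¬ (lo ≤ a ∧ a ≤ hi))]
        congr 1
        omega

theorem abs_le_iff_interval (radius q : Int) (r : Int) :
    (|q + r| ≤ radius) ↔ (-q - radius ≤ r ∧ r ≤ -q + radius) := by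
  rw [abs_le]; omega

-- ===== VERDICT (by name: the statement is the Claim_ definition above) =====
theorem axial_tiles_spec : Claim_equal_axial_tiles := by
  intro radius _
  unfold Spec_axial_tiles axial_tiles axial_tiles_alt
  simp only [PySem.List.foldl_append_singleton_eq_map]
  rw [PySem.List.foldl_append_eq_flatMap]
  apply List.flatMap_congr
  intro q hq
  rw [flatMap_if_eq_map_filter]
  have : (fun r => decide (|q + r| ≤ radius)) =
      (fun r => decide (-q - radius ≤ r ∧ r ≤ -q + radius)) := by
    funext r; simp [abs_le_iff_interval]
  rw [this, filter_pyRange_interval]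
  congr 2; omega
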